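-- pv_equiv track=rewrite | github.com/pavzzz2909/Kurs1 | soc_vkontakte.py | format_dict_vk
-- ===== SOURCE A (Python) =====
-- from itertools import chain
--
-- def format_dict_vk(urls):
--     '''
--     Переименовываем файлы, названные по количеству лайков добавляя в них дату в формате возращаемом API VK
--     '''
--     rev_dict = {}
--     for key, value in urls.items():
--         rev_dict.setdefault(value['filename'], set()).add(key)
--     result = set(chain.from_iterable(
--         values for key, values in rev_dict.items()
--         if len(values) > 1))
--     for i in result:
--         filename = str(urls[i]['filename']).split('.')[0]+'-'+str(urls[i]['date'])+'.jpg'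
--         urls[i]['filename'] = filename
--     return urls
-- ===== SOURCE B (Python) =====
-- def format_dict_vk(urls):
--     # brute force, no reverse index / counter / result set: an entry is renamed
--     # iff some OTHER entry shares its original filename (membership in the rest)
--     originals = [v['filename'] for v in urls.values()]
--     for i, value in enumerate(urls.values()):
--         f = originals[i]
--         if f in originals[:i] or f in originals[i+1:]:
--             value['filename'] = str(f).split('.')[0] + '-' + str(value['date']) + '.jpg'
--     return urls
-- ===== Notes on version B (the rewrite author's own statement) =====
-- stated objective: alternative
-- what changed: Drops A's reverse index (filename -> set of keys) and the chain.from_iterable result-set collection entirely: B snapshots the original filenames once and decides each rename by a direct brute-force membership test of the entry's filename in the rest of that snapshot, renaming in a single enumerate loop.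
import Mathlib
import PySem

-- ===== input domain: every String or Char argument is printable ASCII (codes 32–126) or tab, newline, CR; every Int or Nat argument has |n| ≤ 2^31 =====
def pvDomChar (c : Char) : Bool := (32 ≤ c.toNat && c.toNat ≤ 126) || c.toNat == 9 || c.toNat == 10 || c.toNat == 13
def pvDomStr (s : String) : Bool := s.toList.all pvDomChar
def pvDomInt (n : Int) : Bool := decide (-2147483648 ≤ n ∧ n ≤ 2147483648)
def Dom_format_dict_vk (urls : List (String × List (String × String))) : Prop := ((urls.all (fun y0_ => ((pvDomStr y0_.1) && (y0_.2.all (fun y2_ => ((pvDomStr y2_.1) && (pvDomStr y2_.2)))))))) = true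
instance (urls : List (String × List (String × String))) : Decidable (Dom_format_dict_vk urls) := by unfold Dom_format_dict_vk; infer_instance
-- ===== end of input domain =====

-- B replaces A's reverse index + chained result set by a brute-force pairwise scan: each entry is
-- renamed iff its original filename occurs elsewhere in a snapshot of the original filenames
-- (same in-place mutation of the argument in the Python originals; the equivalence proved is about the returned value).


-- value[k] on an inner dict (assoc list): first-match lookup, shared primitive-style helper
def pvLook (v : List (String × String)) (k : String) : Option String :=
  (PySem.Dict.mk v).get? k

-- ===== PORT A =====
-- (pvLook …).getD "" stands for value['filename'] / ['date']: Pre_ excludes the KeyError inputs.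
def format_dict_vk (urls : List (String × List (String × String))) : List (String × List (String × String)) :=
  let rev : PySem.Dict String (PySem.Set String) :=
    urls.foldl (fun rd kv =>
      PySem.Dict.modify rd ((pvLook kv.2 "filename").getD "") PySem.Set.empty
        (fun s => PySem.Set.add s kv.1)) PySem.Dict.empty
  let result : PySem.Set String :=
    PySem.Set.ofList (((rev.items.filter (fun p => 1 < p.2.length)).map (fun p => p.2)).flatten)
  result.foldl (fun cur i =>
      let entry := ((PySem.Dict.mk cur).get? i).getD []
      let fname := (pvLook entry "filename").getD ""
      let filename := (((PySem.Str.split? fname ".").getD []).headD "") ++ "-" ++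
        ((pvLook entry "date").getD "") ++ ".jpg"
      ((PySem.Dict.mk cur).insert i ((PySem.Dict.mk entry).insert "filename" filename).items).items)
    urls

-- ===== PORT B =====
-- brute force: snapshot the original filenames; an entry is renamed iff its filename occurs
-- elsewhere in the snapshot (originals[:i] or originals[i+1:]); single enumerate loop, no index/set
def format_dict_vk_alt (urls : List (String × List (String × String))) : List (String × List (String × String)) :=
  let originals := urls.map (fun kv => (pvLook kv.2 "filename").getD "")
  (PySem.List.enumerate urls 0).map (fun ikv =>
    let f := (PySem.List.pyGet? originals ikv.1).getD ""
    if f ∈ PySem.List.slice originals none (some ikv.1) ∨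
       f ∈ PySem.List.slice originals (some (ikv.1 + 1)) none then
      (ikv.2.1, ((PySem.Dict.mk ikv.2.2).insert "filename"
        ((((PySem.Str.split? f ".").getD []).headD "") ++ "-" ++
          ((pvLook ikv.2.2 "date").getD "") ++ ".jpg")).items)
    else ikv.2)

-- ===== PRECONDITION & SPEC =====
-- Pre_ excludes association lists with duplicate outer keys (they do not represent a Python dict, A's
-- input type) and the inputs where A raises KeyError: a value without 'filename', or a value whose
-- filename is shared (so A renames it) but which has no 'date'.
def Pre_format_dict_vk (urls : List (String × List (String × String))) : Prop :=
  (urls.map Prod.fst).Nodup ∧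
  ∀ kv ∈ urls, (pvLook kv.2 "filename").isSome = true ∧
    (1 < (urls.map (fun p => (pvLook p.2 "filename").getD "")).count ((pvLook kv.2 "filename").getD "") →
      (pvLook kv.2 "date").isSome = true)
instance (urls : List (String × List (String × String))) : Decidable (Pre_format_dict_vk urls) := by
  unfold Pre_format_dict_vk; infer_instance

def pvWitness_format_dict_vk : (List (String × List (String × String))) :=
  [("k1", [("filename", "a.jpg"), ("date", "1")]), ("k2", [("filename", "a.jpg"), ("date", "2")])]

def Spec_format_dict_vk (urls : List (String × List (String × String))) (out : List (String × List (String × String))) : Prop := out = format_dict_vk_alt urls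
instance (urls : List (String × List (String × String))) (out : List (String × List (String × String))) : Decidable (Spec_format_dict_vk urls out) := by unfold Spec_format_dict_vk; infer_instance

-- ===== CLAIM (what is proved, stated in full; the proofs are below) =====
def Claim_equal_format_dict_vk : Prop := ∀ (urls : List (String × List (String × String))), Dom_format_dict_vk urls → Pre_format_dict_vk urls → Spec_format_dict_vk urls (format_dict_vk urls)

-- ===== LEMMAS AND PROOFS =====

-- filename of an entry, as both ports compute it
def fOf (kv : String × List (String × String)) : String := (pvLook kv.2 "filename").getD ""

-- the renamed entry, as both ports build it
def updOf (kv : String × List (String × String)) : String × List (String × String) :=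
  (kv.1, ((PySem.Dict.mk kv.2).insert "filename"
    ((((PySem.Str.split? (fOf kv) ".").getD []).headD "") ++ "-" ++
      ((pvLook kv.2 "date").getD "") ++ ".jpg")).items)

-- the common normal form both ports are reduced to
def canonOf (urls : List (String × List (String × String))) : List (String × List (String × String)) :=
  urls.map (fun kv => if 1 < (urls.map fOf).count (fOf kv) then updOf kv else kv)

theorem alt_eq_canon (urls : List (String × List (String × String))) :
    format_dict_vk_alt urls = canonOf urls := by
  unfold format_dict_vk_alt canonOf
  dsimp only
  have hos : (urls.map (fun kv => (pvLook kv.2 "filename").getD "")) = urls.map fOf := rfl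
  rw [hos]
  apply List.ext_getElem
  · simp [PySem.List.length_enumerate]
  intro k h1 h2
  rw [List.getElem_map, List.getElem_map, PySem.List.getElem_enumerate]
  have hk : k < urls.length := by simpa [PySem.List.length_enumerate] using h2
  have hkm : k < (urls.map fOf).length := by simpa using hk
  have hzero : ((0 : Int) + (k : Int)) = ((k : Nat) : Int) := by omega
  dsimp only
  rw [hzero]
  have hget : (PySem.List.pyGet? (urls.map fOf) ((k : Nat) : Int)).getD ""
      = fOf urls[k] := by
    rw [PySem.List.pyGet?_natCast, List.getElem?_eq_getElem hkm, Option.getD_some,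
      List.getElem_map]
  have hone : ((k : Nat) : Int) + 1 = (((k + 1 : Nat)) : Int) := by push_cast; ring
  rw [hget, hone, PySem.List.slice_to_natCast, PySem.List.slice_from_natCast]
  have hself : (urls.map fOf)[k] = fOf urls[k] := List.getElem_map _
  have hsplit : urls.map fOf = (urls.map fOf).take k ++ fOf urls[k] :: (urls.map fOf).drop (k + 1) := by
    conv_lhs => rw [← List.take_append_drop k (urls.map fOf)]
    rw [List.drop_eq_getElem_cons hkm, hself]
  have hcond : (fOf urls[k] ∈ (urls.map fOf).take k ∨ fOf urls[k] ∈ (urls.map fOf).drop (k + 1))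
      ↔ 1 < (urls.map fOf).count (fOf urls[k]) := by
    constructor
    · intro h
      conv_rhs => rw [hsplit]
      simp only [List.count_append, List.count_cons, BEq.rfl, if_true]
      rcases h with h | h
      · have := List.count_pos_iff.mpr h; omega
      · have := List.count_pos_iff.mpr h; omega
    · intro h
      rw [hsplit] at h
      simp only [List.count_append, List.count_cons, BEq.rfl, if_true] at h
      by_contra hn
      push_neg at hn
      have h1' : ((urls.map fOf).take k).count (fOf urls[k]) = 0 := by
        rw [List.count_eq_zero]; exact hn.1
      have h2' : ((urls.map fOf).drop (k + 1)).count (fOf urls[k]) = 0 := by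
        rw [List.count_eq_zero]; exact hn.2
      omega
  by_cases hc : 1 < (urls.map fOf).count (fOf urls[k])
  · rw [if_pos (hcond.mpr hc), if_pos hc]
    rfl
  · rw [if_neg (fun h => hc (hcond.mp h)), if_neg hc]

theorem rev_getD (urls : List (String × List (String × String)))
    (hnd : (urls.map Prod.fst).Nodup) (x : String) :
    PySem.Dict.getD (urls.foldl (fun rd kv =>
      PySem.Dict.modify rd ((pvLook kv.2 "filename").getD "") PySem.Set.empty
        (fun s => PySem.Set.add s kv.1)) PySem.Dict.empty) x PySem.Set.empty
    = (urls.filter (fun kv => fOf kv == x)).map Prod.fst := by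
  induction urls using List.reverseRecOn with
  | nil => simp [PySem.Dict.getD_empty, PySem.Set.empty]
  | append_singleton l kv ih =>
      rw [List.map_append] at hnd
      have hnl : (l.map Prod.fst).Nodup := (List.nodup_append.mp hnd).1
      have hnotin : kv.1 ∉ l.map Prod.fst := by
        have hdis := (List.nodup_append.mp hnd).2.2
        intro hmem
        exact hdis kv.1 hmem kv.1 (by simp) rfl
      rw [List.foldl_append]
      simp only [List.foldl_cons, List.foldl_nil, PySem.Dict.getD_modify, List.filter_append,
        List.map_append]
      by_cases hx : x = (pvLook kv.2 "filename").getD ""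
      · subst hx
        rw [if_pos rfl, ih hnl]
        have hk1 : kv.1 ∉ (l.filter (fun kv' => fOf kv' == (pvLook kv.2 "filename").getD "")).map Prod.fst := by
          intro hmem
          rcases List.mem_map.mp hmem with ⟨p, hp, hfst⟩
          exact hnotin (hfst ▸ List.mem_map_of_mem (List.mem_of_mem_filter hp))
        rw [PySem.Set.add_of_not_mem hk1]
        have hf : ((fun kv' => fOf kv' == (pvLook kv.2 "filename").getD "") kv) = true := by simp [fOf]
        simp [hf]
      · rw [if_neg hx, ih hnl]
        have hf : ((fun kv' => fOf kv' == x) kv) = false := by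
          simp [fOf]; intro h; exact absurd h.symm hx
        simp [hf]

theorem mem_result (urls : List (String × List (String × String)))
    (hnd : (urls.map Prod.fst).Nodup) (i : String) :
    (i ∈ PySem.Set.ofList ((((urls.foldl (fun rd kv =>
      PySem.Dict.modify rd ((pvLook kv.2 "filename").getD "") PySem.Set.empty
        (fun s => PySem.Set.add s kv.1)) PySem.Dict.empty).items.filter
        (fun p => 1 < p.2.length)).map (fun p => p.2)).flatten))
    ↔ ∃ kv ∈ urls, kv.1 = i ∧ 1 < (urls.map fOf).count (fOf kv) := by
  have hkeys : (urls.foldl (fun rd kv =>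
      PySem.Dict.modify rd ((pvLook kv.2 "filename").getD "") PySem.Set.empty
        (fun s => PySem.Set.add s kv.1)) PySem.Dict.empty).keys
      = PySem.Set.ofList (urls.map (fun kv => (pvLook kv.2 "filename").getD "")) := by
    rw [PySem.Dict.keys_foldl_modify_key urls (fun kv => (pvLook kv.2 "filename").getD "")
      PySem.Set.empty (fun _ kv s => PySem.Set.add s kv.1) PySem.Dict.empty]
    simp only [PySem.Dict.keys_empty, PySem.Set.update_nil_left]
  have hnk : (urls.foldl (fun rd kv =>
      PySem.Dict.modify rd ((pvLook kv.2 "filename").getD "") PySem.Set.empty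
        (fun s => PySem.Set.add s kv.1)) PySem.Dict.empty).keys.Nodup := by
    rw [hkeys]; exact PySem.Set.nodup_ofList _
  have hcount : ∀ x : String, ((urls.filter (fun kv => fOf kv == x)).map Prod.fst).length
      = (urls.map fOf).count x := by
    intro x
    rw [List.length_map, List.count_eq_countP, List.countP_map, List.countP_eq_length_filter]
    rfl
  rw [PySem.Set.mem_ofList]
  simp only [List.mem_flatten, List.mem_map, List.mem_filter]
  constructor
  · rintro ⟨gl, ⟨p, ⟨hpmem, hplen⟩, rfl⟩, hi⟩
    have hp2 : p.2 = (urls.filter (fun kv => fOf kv == p.1)).map Prod.fst := by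
      rw [← rev_getD urls hnd p.1]
      exact (PySem.Dict.getD_of_mem_items _ (by exact hpmem) hnk PySem.Set.empty).symm
    have hplen' := of_decide_eq_true hplen
    rw [hp2] at hi hplen'
    rcases List.mem_map.mp hi with ⟨kv, hkvf, hkv1⟩
    have hkvm := List.mem_of_mem_filter hkvf
    have hfx : fOf kv = p.1 := by
      have := List.of_mem_filter hkvf
      exact eq_of_beq this
    refine ⟨kv, hkvm, hkv1, ?_⟩
    rw [hfx, ← hcount p.1]
    exact hplen'
  · rintro ⟨kv, hkv, rfl, hcnt⟩
    have hx : fOf kv ∈ (urls.foldl (fun rd kv =>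
        PySem.Dict.modify rd ((pvLook kv.2 "filename").getD "") PySem.Set.empty
          (fun s => PySem.Set.add s kv.1)) PySem.Dict.empty).keys := by
      rw [hkeys, PySem.Set.mem_ofList]
      exact List.mem_map_of_mem hkv
    rcases List.mem_map.mp hx with ⟨p, hpmem, hp1⟩
    have hp2 : p.2 = (urls.filter (fun kv' => fOf kv' == p.1)).map Prod.fst := by
      rw [← rev_getD urls hnd p.1]
      exact (PySem.Dict.getD_of_mem_items _ (by exact hpmem) hnk PySem.Set.empty).symm
    refine ⟨p.2, ⟨p, ⟨hpmem, ?_⟩, rfl⟩, ?_⟩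
    · refine decide_eq_true ?_
      rw [hp2, hcount, hp1]
      exact hcnt
    · rw [hp2]
      refine List.mem_map_of_mem (List.mem_filter.mpr ⟨hkv, ?_⟩)
      simp [hp1]

theorem get?_mk_map (urls : List (String × List (String × String)))
    (g : String × List (String × String) → String × List (String × String))
    (hg : ∀ kv, (g kv).1 = kv.1) (hnd : (urls.map Prod.fst).Nodup)
    (kv0 : String × List (String × String)) (hmem : kv0 ∈ urls) :
    (PySem.Dict.mk (urls.map g)).get? kv0.1 = some (g kv0).2 := by
  induction urls with
  | nil => cases hmem
  | cons kv rest ih =>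
      rw [List.map_cons] at hnd
      have h1 := (List.nodup_cons.mp hnd).1
      have h2 := (List.nodup_cons.mp hnd).2
      rw [List.map_cons, PySem.Dict.get?_mk_cons]
      rcases List.mem_cons.mp hmem with rfl | hmem'
      · rw [if_pos (by simp [hg])]
      · have hne : (g kv).1 ≠ kv0.1 := by
          rw [hg]
          intro h
          exact h1 (h ▸ List.mem_map_of_mem hmem')
        rw [if_neg (by simpa using hne)]
        exact ih h2 hmem'

theorem mut_fold (urls : List (String × List (String × String)))
    (hnd : (urls.map Prod.fst).Nodup) (R S : List String)
    (hR : R.Nodup) (hsub : ∀ i ∈ R, i ∈ urls.map Prod.fst) (hdis : ∀ i ∈ R, i ∉ S) :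
    R.foldl (fun cur i =>
      ((PySem.Dict.mk cur).insert i
        ((PySem.Dict.mk (((PySem.Dict.mk cur).get? i).getD [])).insert "filename"
          ((((PySem.Str.split? ((pvLook (((PySem.Dict.mk cur).get? i).getD []) "filename").getD "") ".").getD []).headD "") ++ "-" ++
            ((pvLook (((PySem.Dict.mk cur).get? i).getD []) "date").getD "") ++ ".jpg")).items).items)
      (urls.map (fun kv => if kv.1 ∈ S then updOf kv else kv))
    = urls.map (fun kv => if kv.1 ∈ S ∨ kv.1 ∈ R then updOf kv else kv) := by
  induction R generalizing S with
  | nil =>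
      simp only [List.foldl_nil, List.not_mem_nil, or_false]
  | cons i R' ih =>
      rcases List.mem_map.mp (hsub i List.mem_cons_self) with ⟨kv0, hkv0, hi0⟩
      have h0S : kv0.1 ∉ S := hi0 ▸ hdis i List.mem_cons_self
      have hg : ∀ kv : String × List (String × String),
          ((fun kv => if kv.1 ∈ S then updOf kv else kv) kv).1 = kv.1 := by
        intro kv; by_cases h : kv.1 ∈ S <;> simp [h, updOf]
      rw [List.foldl_cons]
      have hget : ((PySem.Dict.mk (urls.map (fun kv => if kv.1 ∈ S then updOf kv else kv))).get? i)
          = some kv0.2 := by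
        rw [← hi0, get?_mk_map urls _ hg hnd kv0 hkv0]
        simp [h0S]
      have hcont : (PySem.Dict.mk (urls.map (fun kv => if kv.1 ∈ S then updOf kv else kv))).contains i
          = true := by
        rw [PySem.Dict.contains_iff_mem_keys, PySem.Dict.keys_mk, List.map_map]
        rw [← hi0]
        have : (Prod.fst ∘ fun kv => if kv.1 ∈ S then updOf kv else kv)
            = (Prod.fst : String × List (String × String) → String) := by
          funext kv; exact hg kv
        rw [this]
        exact List.mem_map_of_mem hkv0
      have hstep : ((PySem.Dict.mk (urls.map (fun kv => if kv.1 ∈ S then updOf kv else kv))).insert i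
            ((PySem.Dict.mk (((PySem.Dict.mk (urls.map (fun kv => if kv.1 ∈ S then updOf kv else kv))).get? i).getD [])).insert "filename"
              ((((PySem.Str.split? ((pvLook (((PySem.Dict.mk (urls.map (fun kv => if kv.1 ∈ S then updOf kv else kv))).get? i).getD []) "filename").getD "") ".").getD []).headD "") ++ "-" ++
                ((pvLook (((PySem.Dict.mk (urls.map (fun kv => if kv.1 ∈ S then updOf kv else kv))).get? i).getD []) "date").getD "") ++ ".jpg")).items).items
          = urls.map (fun kv => if kv.1 ∈ i :: S then updOf kv else kv) := by
        show ((PySem.Dict.mk (urls.map (fun kv => if kv.1 ∈ S then updOf kv else kv))).insert i _).items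
          = _
        rw [PySem.Dict.items_insert_of_contains _ _ hcont]
        show (urls.map (fun kv => if kv.1 ∈ S then updOf kv else kv)).map _ = _
        rw [List.map_map]
        refine List.map_congr_left ?_
        intro kv hkv
        simp only [Function.comp]
        have hfst : (if kv.1 ∈ S then updOf kv else kv).1 = kv.1 := by
          by_cases h : kv.1 ∈ S <;> simp [h, updOf]
        by_cases hki : kv.1 = i
        · subst hki
          have hkveq : kv0 = kv := List.inj_on_of_nodup_map hnd hkv0 hkv hi0
          subst hkveq
          have hb : ((if kv0.1 ∈ S then updOf kv0 else kv0).1 == kv0.1) = true := by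
            simp [hfst]
          rw [if_pos hb, if_pos (List.mem_cons_self)]
          rw [hget]
          rfl
        · have hb : ((if kv.1 ∈ S then updOf kv else kv).1 == i) = false := by
            simp only [hfst, beq_eq_false_iff_ne, ne_eq]
            exact hki
          rw [if_neg (by simp [hb])]
          have : kv.1 ∈ i :: S ↔ kv.1 ∈ S := by
            simp [List.mem_cons, hki]
          by_cases h2 : kv.1 ∈ S
          · rw [if_pos h2, if_pos (this.mpr h2)]
          · rw [if_neg h2, if_neg (fun h => h2 (this.mp h))]
      rw [hstep]
      have hdis' : ∀ j ∈ R', j ∉ i :: S := by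
        intro j hj
        simp only [List.mem_cons, not_or]
        exact ⟨fun h => (List.nodup_cons.mp hR).1 (h ▸ hj),
          hdis j (List.mem_cons_of_mem _ hj)⟩
      rw [ih (i :: S) (List.nodup_cons.mp hR).2 (fun j hj => hsub j (List.mem_cons_of_mem _ hj)) hdis']
      refine List.map_congr_left ?_
      intro kv _
      by_cases h1 : kv.1 = i <;> by_cases h2 : kv.1 ∈ S <;> by_cases h3 : kv.1 ∈ R' <;>
        simp [h1, h2, h3]

theorem a_eq_canon (urls : List (String × List (String × String)))
    (hnd : (urls.map Prod.fst).Nodup) :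
    format_dict_vk urls = canonOf urls := by
  unfold format_dict_vk canonOf
  dsimp only
  have hsub : ∀ i ∈ PySem.Set.ofList ((((urls.foldl (fun rd kv =>
      PySem.Dict.modify rd ((pvLook kv.2 "filename").getD "") PySem.Set.empty
        (fun s => PySem.Set.add s kv.1)) PySem.Dict.empty).items.filter
        (fun p => 1 < p.2.length)).map (fun p => p.2)).flatten), i ∈ urls.map Prod.fst := by
    intro i hi
    rcases (mem_result urls hnd i).mp hi with ⟨kv, hkv, rfl, _⟩
    exact List.mem_map_of_mem hkv
  have h0 : urls.map (fun kv => if kv.1 ∈ ([] : List String) then updOf kv else kv) = urls := by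
    simp
  have hA := mut_fold urls hnd (PySem.Set.ofList ((((urls.foldl (fun rd kv =>
      PySem.Dict.modify rd ((pvLook kv.2 "filename").getD "") PySem.Set.empty
        (fun s => PySem.Set.add s kv.1)) PySem.Dict.empty).items.filter
        (fun p => 1 < p.2.length)).map (fun p => p.2)).flatten)) []
    (PySem.Set.nodup_ofList _) hsub (by simp)
  rw [h0] at hA
  rw [hA]
  refine List.map_congr_left ?_
  intro kv hkv
  have hiff : (kv.1 ∈ ([] : List String) ∨ kv.1 ∈ PySem.Set.ofList ((((urls.foldl (fun rd kv =>
      PySem.Dict.modify rd ((pvLook kv.2 "filename").getD "") PySem.Set.empty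
        (fun s => PySem.Set.add s kv.1)) PySem.Dict.empty).items.filter
        (fun p => 1 < p.2.length)).map (fun p => p.2)).flatten))
      ↔ 1 < (urls.map fOf).count (fOf kv) := by
    simp only [List.not_mem_nil, false_or]
    rw [mem_result urls hnd kv.1]
    constructor
    · rintro ⟨kv', hkv', heq, hc⟩
      have hkk : kv' = kv := List.inj_on_of_nodup_map hnd hkv' hkv heq
      rwa [hkk] at hc
    · intro hc
      exact ⟨kv, hkv, rfl, hc⟩
  by_cases hc : 1 < (urls.map fOf).count (fOf kv)
  · rw [if_pos (hiff.mpr hc), if_pos hc]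
  · rw [if_neg (fun h => hc (hiff.mp h)), if_neg hc]

-- ===== VERDICT (by name: the statement is the Claim_ definition above) =====
theorem format_dict_vk_spec : Claim_equal_format_dict_vk := by
  intro urls _ hpre
  show format_dict_vk urls = format_dict_vk_alt urls
  rw [a_eq_canon urls hpre.1, alt_eq_canon]
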